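-- pv_equiv track=rewrite | github.com/GertMadsen/DeathCauses | lib/statistic.py | find_inc
-- ===== SOURCE A (Python) =====
-- def find_inc(data_set, start_year, end_year, cause):
--     state_dict = {}
--     for data in data_set:
--         state_dict.setdefault(data[2], 0)
--         if data[0] == end_year and data[1] == cause:
--             state_dict[data[2]] += data[3]
--         if data[0] == start_year and data[1] == cause:
--             state_dict[data[2]] -= data[3]
--     return state_dict
-- ===== SOURCE B (Python) =====
-- def find_inc(data_set, start_year, end_year, cause):
--     states = list(dict.fromkeys(row[2] for row in data_set))
--
--     def total(year, state):
--         return sum(row[3] for row in data_set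
--                    if row[2] == state and row[1] == cause and row[0] == year)
--
--     return {s: total(end_year, s) - total(start_year, s) for s in states}
-- ===== Notes on version B (the rewrite author's own statement) =====
-- stated objective: alternative
-- what changed: Replaces A's single-pass mutable accumulator dict by a per-key aggregation: first collect the distinct states in order, then for each state compute end-year and start-year filtered sums over the data set and take their difference (O(n*k) nested scans instead of O(n) dict updates).
import Mathlib
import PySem

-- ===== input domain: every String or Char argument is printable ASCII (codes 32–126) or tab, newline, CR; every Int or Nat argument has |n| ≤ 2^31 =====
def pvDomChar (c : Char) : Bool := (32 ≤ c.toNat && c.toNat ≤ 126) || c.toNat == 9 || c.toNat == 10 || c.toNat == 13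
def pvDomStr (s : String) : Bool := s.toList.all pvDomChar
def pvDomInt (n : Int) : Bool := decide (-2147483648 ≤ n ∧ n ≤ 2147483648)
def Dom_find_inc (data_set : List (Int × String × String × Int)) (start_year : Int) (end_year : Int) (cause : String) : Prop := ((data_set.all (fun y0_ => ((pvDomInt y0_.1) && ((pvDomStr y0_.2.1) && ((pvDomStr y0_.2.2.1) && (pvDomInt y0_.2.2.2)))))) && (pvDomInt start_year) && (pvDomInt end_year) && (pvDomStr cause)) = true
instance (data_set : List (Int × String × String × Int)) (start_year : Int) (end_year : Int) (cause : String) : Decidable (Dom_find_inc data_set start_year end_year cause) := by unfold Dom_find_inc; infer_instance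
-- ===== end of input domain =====

-- B replaces A's single-pass accumulator dict by per-key aggregation: collect the distinct
-- states in order, then for each state take the difference of two filtered sums; objective: alternative.


-- ===== PORT A =====
-- one loop body of A: setdefault, then the two conditional in-place updates
def stepA (start_year end_year : Int) (cause : String)
    (d : PySem.Dict String Int) (data : Int × String × String × Int) : PySem.Dict String Int :=
  let d1 := d.setdefault data.2.2.1 0
  let d2 := if data.1 = end_year ∧ data.2.1 = cause
            then d1.modify data.2.2.1 0 (· + data.2.2.2) else d1
  if data.1 = start_year ∧ data.2.1 = cause
  then d2.modify data.2.2.1 0 (· - data.2.2.2) else d2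

def find_inc (data_set : List (Int × String × String × Int)) (start_year : Int) (end_year : Int) (cause : String) : List (String × Int) :=
  (data_set.foldl (stepA start_year end_year cause) PySem.Dict.empty).items

-- ===== PORT B =====
-- B's inner generator: sum(row[3] for row in data_set if row[2]==state and row[1]==cause and row[0]==year)
def totalB (data_set : List (Int × String × String × Int)) (cause : String) (year : Int) (state : String) : Int :=
  ((data_set.filter (fun r => r.2.2.1 == state && r.2.1 == cause && r.1 == year)).map (fun r => r.2.2.2)).sum

def find_inc_alt (data_set : List (Int × String × String × Int)) (start_year : Int) (end_year : Int) (cause : String) : List (String × Int) :=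
  let states := PySem.List.dedup (data_set.map (fun r => r.2.2.1))
  states.map (fun s => (s, totalB data_set cause end_year s - totalB data_set cause start_year s))

-- ===== PRECONDITION & SPEC =====
def Spec_find_inc (data_set : List (Int × String × String × Int)) (start_year : Int) (end_year : Int) (cause : String) (out : List (String × Int)) : Prop := out = find_inc_alt data_set start_year end_year cause
instance (data_set : List (Int × String × String × Int)) (start_year : Int) (end_year : Int) (cause : String) (out : List (String × Int)) : Decidable (Spec_find_inc data_set start_year end_year cause out) := by unfold Spec_find_inc; infer_instance

-- ===== CLAIM (what is proved, stated in full; the proofs are below) =====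
def Claim_equal_find_inc : Prop := ∀ (data_set : List (Int × String × String × Int)) (start_year : Int) (end_year : Int) (cause : String), Dom_find_inc data_set start_year end_year cause → Spec_find_inc data_set start_year end_year cause (find_inc data_set start_year end_year cause)

-- ===== LEMMAS AND PROOFS =====

-- A's loop body touches exactly the key r.2.2.1: keys grow by Set.add
lemma keys_stepA (sy ey : Int) (c : String) (d : PySem.Dict String Int)
    (r : Int × String × String × Int) :
    (stepA sy ey c d r).keys = PySem.Set.add d.keys r.2.2.1 := by
  obtain ⟨y, cc, st, v⟩ := r
  have hm : ∀ (e : PySem.Dict String Int) (f : Int → Int), e.contains st = true →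
      (e.modify st 0 f).keys = e.keys ∧ (e.modify st 0 f).contains st = true := by
    intro e f he
    refine ⟨?_, ?_⟩
    · rw [PySem.Dict.keys_modify, PySem.Dict.keys_insert_of_contains _ _ he]
    · simp [PySem.Dict.contains_modify, he]
  have h1 : (d.setdefault st (0 : Int)).contains st = true := by
    simp [PySem.Dict.contains_setdefault]
  have hsd : (d.setdefault st (0 : Int)).keys = PySem.Set.add d.keys st := by
    rw [PySem.Dict.keys_setdefault, PySem.Set.add_eq_ite]
    simp [PySem.Dict.contains_iff_mem_keys]
  simp only [stepA]
  split_ifs with hA hB hB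
  · rw [(hm _ _ ((hm _ _ h1).2)).1, (hm _ _ h1).1, hsd]
  · rw [(hm _ _ h1).1, hsd]
  · rw [(hm _ _ h1).1, hsd]
  · rw [hsd]

lemma keys_fold_stepA (ds : List (Int × String × String × Int)) (sy ey : Int) (c : String)
    (d : PySem.Dict String Int) :
    (ds.foldl (stepA sy ey c) d).keys = PySem.Set.update d.keys (ds.map (fun r => r.2.2.1)) := by
  induction ds generalizing d with
  | nil => simp [PySem.Set.update]
  | cons r t ih =>
      simp only [List.foldl_cons, List.map_cons, PySem.Set.update_cons]
      rw [ih, keys_stepA]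

-- value at key k after one step of A
lemma getD_stepA (sy ey : Int) (c : String) (d : PySem.Dict String Int)
    (r : Int × String × String × Int) (k : String) :
    (stepA sy ey c d r).getD k 0 =
      d.getD k 0 +
        (if r.2.2.1 = k ∧ r.2.1 = c ∧ r.1 = ey then r.2.2.2 else 0) -
        (if r.2.2.1 = k ∧ r.2.1 = c ∧ r.1 = sy then r.2.2.2 else 0) := by
  obtain ⟨y, cc, st, v⟩ := r
  have hsd : ∀ k', (d.setdefault st (0 : Int)).getD k' 0 = d.getD k' 0 := by
    intro k'
    by_cases hk : k' = st
    · subst hk; rw [PySem.Dict.getD_setdefault_self]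
    · rw [PySem.Dict.getD_eq_get?_getD, PySem.Dict.get?_setdefault_of_ne _ _ hk,
        ← PySem.Dict.getD_eq_get?_getD]
  by_cases hk : st = k
  · subst hk
    simp only [stepA]
    split_ifs with h1 h2 h2 <;> simp_all [PySem.Dict.getD_modify, hsd]
  · have hmod : ∀ (e : PySem.Dict String Int) (f : Int → Int),
        (e.modify st 0 f).getD k 0 = e.getD k 0 := by
      intro e f; rw [PySem.Dict.getD_modify]; simp [Ne.symm hk]
    simp only [stepA]
    split_ifs <;> simp_all [hmod, hsd, hk]

lemma totalB_cons (r : Int × String × String × Int)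
    (t : List (Int × String × String × Int)) (c : String) (y : Int) (k : String) :
    totalB (r :: t) c y k =
      (if r.2.2.1 = k ∧ r.2.1 = c ∧ r.1 = y then r.2.2.2 else 0) + totalB t c y k := by
  simp only [totalB, List.filter_cons]
  split_ifs with h1 h2 h2 <;> simp_all

-- value at key k after A's whole loop = B's difference of filtered sums
lemma getD_fold_stepA (ds : List (Int × String × String × Int)) (sy ey : Int) (c : String)
    (d : PySem.Dict String Int) (k : String) :
    (ds.foldl (stepA sy ey c) d).getD k 0 =
      d.getD k 0 + totalB ds c ey k - totalB ds c sy k := by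
  induction ds generalizing d with
  | nil => simp [totalB]
  | cons r t ih =>
      simp only [List.foldl_cons]
      rw [ih, getD_stepA, totalB_cons, totalB_cons]
      ring

-- ===== VERDICT (by name: the statement is the Claim_ definition above) =====
theorem find_inc_spec : Claim_equal_find_inc := by
  intro ds sy ey c _
  unfold Spec_find_inc find_inc find_inc_alt
  have hkeys : (ds.foldl (stepA sy ey c) PySem.Dict.empty).keys
      = PySem.List.dedup (ds.map (fun r => r.2.2.1)) := by
    rw [keys_fold_stepA]
    simp [PySem.Dict.keys_empty, PySem.Set.update_nil_left]
  have hnd : (ds.foldl (stepA sy ey c) PySem.Dict.empty).keys.Nodup := by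
    rw [hkeys]; simp
  rw [PySem.Dict.items_eq_map_keys _ hnd 0, hkeys]
  apply List.map_congr_left
  intro s _
  rw [getD_fold_stepA]
  simp [PySem.Dict.getD_empty]
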